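-- pv_equiv track=rewrite | github.com/MatsuTaku/PythonToTrial | practice/prac5.py | sortedPrimeNumbers
-- ===== SOURCE A (Python) =====
-- import math
--
-- def isPrime(num):
--     '''
--         以下は効率のいいアルゴリズムの例
--         単純でも出力が正しければ no problem
--     '''
--     # １以下を足切り
--     if num <= 1:
--         return False
--     # ２以降の偶数を足切り
--     # 偶奇の足切りは単純に効率が良い
--     if num > 2 and num % 2 == 0:
--         return False
--     # 探索は，√num までで十分
--     for i in range(3, int(math.sqrt(num)) + 1, 2):
--         if num % i == 0:
--             return False
--     # 全てのフィルタリングを通過すれば，素数である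
--     return True
--
-- def sortedPrimeNumbers(list):
--     new = []
--     prev = 0 # 重複判定用．素数じゃない値で初期化
--     # ソートしてから探索
--     for v in sorted(list):
--         '''
--             途中でcontinueさせるのは，ネストを浅く保つテクニック
--         '''
--         # 直前と同じものはスキップ
--         if v == prev:
--             continue
--         prev = v
--         # 素数判定
--         if not isPrime(v):
--             continue
--         # 追加
--         new.append(v)
--     return new
-- ===== SOURCE B (Python) =====
-- import math
--
-- def isPrime(num):
--     # byte-identical primality test (kept so decisions match A exactly)
--     if num <= 1:
--         return False
--     if num > 2 and num % 2 == 0: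
--         return False
--     for i in range(3, int(math.sqrt(num)) + 1, 2):
--         if num % i == 0:
--             return False
--     return True
--
-- def sortedPrimeNumbers(list):
--     # dedup with a hash set first, test primality once per distinct value, sort last
--     return sorted(p for p in set(list) if isPrime(p))
-- ===== Notes on version B (the rewrite author's own statement) =====
-- stated objective: idiomatic
-- what changed: Deduplicate via a hash set before the primality filter and sort only the surviving distinct values, instead of sorting the whole list first and skipping adjacent duplicates with a prev sentinel inside the loop.
import Mathlib
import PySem

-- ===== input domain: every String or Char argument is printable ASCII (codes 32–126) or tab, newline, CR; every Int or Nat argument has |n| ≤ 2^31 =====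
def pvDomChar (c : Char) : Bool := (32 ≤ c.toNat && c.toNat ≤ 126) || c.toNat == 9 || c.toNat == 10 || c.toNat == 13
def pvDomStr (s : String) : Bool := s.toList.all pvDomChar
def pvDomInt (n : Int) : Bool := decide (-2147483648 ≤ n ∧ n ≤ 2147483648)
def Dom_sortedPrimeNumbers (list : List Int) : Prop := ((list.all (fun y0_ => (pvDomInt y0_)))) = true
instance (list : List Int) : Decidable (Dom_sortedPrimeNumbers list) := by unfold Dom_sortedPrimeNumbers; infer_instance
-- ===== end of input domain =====

-- B deduplicates with a hash set before the primality filter and sorts last, instead of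
-- sorting first and skipping adjacent duplicates with a prev sentinel (objective: idiomatic).

-- ===== PORT A =====
-- shared helper (Source B keeps isPrime byte-identical).
-- int(math.sqrt(num)) is ported as Nat.sqrt: exact on the domain |num| ≤ 2^31 (CPython's
-- correctly-rounded double sqrt agrees with isqrt there; num > 1 at that point, so toNat is safe).
-- num % i has i ≥ 3 > 0, ported with PySem.Int.mod.
def isPrime (num : Int) : Bool :=
  if num ≤ 1 then false
  else if num > 2 && num % 2 == 0 then false
  else (PySem.List.pyRange 3 (Int.ofNat (Nat.sqrt num.toNat) + 1) 2).all
         (fun i => !(PySem.Int.mod num i == 0))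

-- loop state: (new, prev); branch order as in A
def pvStepA (st : List Int × Int) (v : Int) : List Int × Int :=
  if v == st.2 then st
  else (if !isPrime v then st.1 else st.1 ++ [v], v)

def sortedPrimeNumbers (list : List Int) : List Int :=
  ((PySem.List.sorted list (fun x => x) false).foldl pvStepA ([], 0)).1

-- ===== PORT B =====
-- sorted(p for p in set(list) if isPrime(p)): set iteration is consumed only by a
-- key-less sorted, so the hash order cannot influence the result.
def sortedPrimeNumbers_alt (list : List Int) : List Int :=
  PySem.List.sorted ((PySem.Set.ofList list).filter isPrime) (fun x => x) false

-- ===== PRECONDITION & SPEC =====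
def Spec_sortedPrimeNumbers (list : List Int) (out : List Int) : Prop := out = sortedPrimeNumbers_alt list
instance (list : List Int) (out : List Int) : Decidable (Spec_sortedPrimeNumbers list out) := by unfold Spec_sortedPrimeNumbers; infer_instance

-- ===== CLAIM (what is proved, stated in full; the proofs are below) =====
def Claim_equal_sortedPrimeNumbers : Prop := ∀ (list : List Int), Dom_sortedPrimeNumbers list → Spec_sortedPrimeNumbers list (sortedPrimeNumbers list)

-- ===== LEMMAS AND PROOFS =====

-- destutter with running prev: what A's prev-skipping computes on the sorted list
def pvDD (p : Int) : List Int → List Int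
  | [] => []
  | v :: t => if v = p then pvDD p t else v :: pvDD v t

theorem pvLoop_eq (l : List Int) : ∀ (new : List Int) (prev : Int),
    (l.foldl pvStepA (new, prev)).1 = new ++ (pvDD prev l).filter isPrime := by
  induction l with
  | nil => intro new prev; simp [pvDD]
  | cons v t ih =>
    intro new prev
    by_cases h : v = prev
    · simp [pvStepA, pvDD, h, ih]
    · by_cases hp : isPrime v
      · simp [pvStepA, pvDD, h, hp, ih]
      · simp [pvStepA, pvDD, h, hp, ih]

theorem mem_pvDD {x p : Int} {l : List Int} (h : x ∈ pvDD p l) : x ∈ l := by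
  induction l generalizing p with
  | nil => simp [pvDD] at h
  | cons v t ih =>
    by_cases hv : v = p
    · simp only [pvDD, if_pos hv] at h
      exact List.mem_cons_of_mem _ (ih h)
    · simp only [pvDD, if_neg hv, List.mem_cons] at h
      rcases h with h | h
      · simp [h]
      · exact List.mem_cons_of_mem _ (ih h)

theorem mem_pvDD_of_ne {x p : Int} {l : List Int} (hx : x ∈ l) (hne : x ≠ p) :
    x ∈ pvDD p l := by
  induction l generalizing p with
  | nil => simp at hx
  | cons v t ih =>
    rcases List.mem_cons.mp hx with rfl | hx
    · simp [pvDD, hne]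
    · by_cases hv : v = p
      · simp only [pvDD, if_pos hv]; exact ih hx hne
      · simp only [pvDD, if_neg hv, List.mem_cons]
        by_cases hxv : x = v
        · exact Or.inl hxv
        · exact Or.inr (ih hx hxv)

theorem not_mem_pvDD_self {v : Int} {l : List Int}
    (hp : l.Pairwise (· ≤ ·)) (hle : ∀ y ∈ l, v ≤ y) : v ∉ pvDD v l := by
  induction l with
  | nil => simp [pvDD]
  | cons w t ih =>
    have hwt : ∀ y ∈ t, w ≤ y := (List.pairwise_cons.mp hp).1
    have hpt : t.Pairwise (· ≤ ·) := (List.pairwise_cons.mp hp).2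
    by_cases hw : w = v
    · simp only [pvDD, if_pos hw]
      exact ih hpt (fun y hy => hle y (List.mem_cons_of_mem _ hy))
    · simp only [pvDD, if_neg hw, List.mem_cons, not_or]
      have hvw : v < w :=
        lt_of_le_of_ne (hle w (List.mem_cons_self ..)) (fun h => hw h.symm)
      refine ⟨fun h => hw h.symm, fun hmem => ?_⟩
      exact absurd hvw (not_lt.mpr (hwt v (mem_pvDD hmem)))

theorem pairwise_pvDD {p : Int} {l : List Int}
    (hp : l.Pairwise (· ≤ ·)) : (pvDD p l).Pairwise (· < ·) := by
  induction l generalizing p with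
  | nil => simp [pvDD]
  | cons v t ih =>
    have hvt : ∀ y ∈ t, v ≤ y := (List.pairwise_cons.mp hp).1
    have hpt : t.Pairwise (· ≤ ·) := (List.pairwise_cons.mp hp).2
    by_cases hv : v = p
    · simp only [pvDD, if_pos hv]; exact ih hpt
    · simp only [pvDD, if_neg hv, List.pairwise_cons]
      refine ⟨fun y hy => ?_, ih hpt⟩
      have hle := hvt y (mem_pvDD hy)
      have hne : y ≠ v := fun h => not_mem_pvDD_self hpt hvt (h ▸ hy)
      exact lt_of_le_of_ne hle (fun h => hne h.symm)

theorem two_le_of_isPrime {n : Int} (h : isPrime n = true) : 2 ≤ n := by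
  by_cases hn : n ≤ 1
  · simp [isPrime, hn] at h
  · omega

-- ===== VERDICT (by name: the statement is the Claim_ definition above) =====
theorem sortedPrimeNumbers_spec : Claim_equal_sortedPrimeNumbers := by
  intro list _
  unfold Spec_sortedPrimeNumbers sortedPrimeNumbers sortedPrimeNumbers_alt
  set s := PySem.List.sorted list (fun x => x) false with hs
  have hA : (s.foldl pvStepA ([], 0)).1 = (pvDD 0 s).filter isPrime := by
    simpa using pvLoop_eq s [] 0
  rw [hA]
  have hsp : s.Pairwise (· ≤ ·) := by
    simpa using PySem.List.sorted_pairwise list (fun x => x)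
  have hys : ((pvDD 0 s).filter isPrime).Pairwise (· < ·) :=
    (pairwise_pvDD hsp).filter _
  have hperm : ((pvDD 0 s).filter isPrime).Perm ((PySem.Set.ofList list).filter isPrime) := by
    have hn1 : ((pvDD 0 s).filter isPrime).Nodup :=
      hys.imp (fun h => ne_of_lt h)
    have hn2 : ((PySem.Set.ofList list).filter isPrime).Nodup :=
      (PySem.Set.nodup_ofList list).filter _
    rw [List.perm_ext_iff_of_nodup hn1 hn2]
    intro a
    simp only [List.mem_filter, PySem.Set.mem_ofList]
    constructor
    · rintro ⟨ha, hpa⟩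
      exact ⟨by simpa [hs, PySem.List.mem_sorted] using mem_pvDD ha, hpa⟩
    · rintro ⟨ha, hpa⟩
      have h2 := two_le_of_isPrime hpa
      have hin : a ∈ s := by simpa [hs, PySem.List.mem_sorted] using ha
      exact ⟨mem_pvDD_of_ne hin (by omega), hpa⟩
  exact (PySem.List.sorted_eq_of_perm_of_pairwise_lt _ _ _ hperm hys).symm
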